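-- pv_equiv track=rewrite | github.com/paiml/depyler | examples/hard_infer_chain4.py | conditional_accumulate
-- ===== SOURCE A (Python) =====
-- def conditional_accumulate(n, use_squares):
--     """Accumulate either values or their squares based on flag."""
--     total = 0
--     i = 1
--     while i <= n:
--         if use_squares > 0:
--             total = total + i * i
--         else:
--             total = total + i
--         i = i + 1
--     return total
-- ===== SOURCE B (Python) =====
-- def conditional_accumulate(n, use_squares):
--     """Closed-form: Gauss sum n(n+1)/2 or square-pyramidal n(n+1)(2n+1)/6."""
--     if n < 1:
--         return 0
--     if use_squares > 0:
--         return n * (n + 1) * (2 * n + 1) // 6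
--     return n * (n + 1) // 2
-- ===== Notes on version B (the rewrite author's own statement) =====
-- stated objective: faster
-- what changed: Replaces the O(n) accumulation loop with the closed-form Gauss sum n(n+1)/2 and square-pyramidal formula n(n+1)(2n+1)/6.
import Mathlib
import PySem

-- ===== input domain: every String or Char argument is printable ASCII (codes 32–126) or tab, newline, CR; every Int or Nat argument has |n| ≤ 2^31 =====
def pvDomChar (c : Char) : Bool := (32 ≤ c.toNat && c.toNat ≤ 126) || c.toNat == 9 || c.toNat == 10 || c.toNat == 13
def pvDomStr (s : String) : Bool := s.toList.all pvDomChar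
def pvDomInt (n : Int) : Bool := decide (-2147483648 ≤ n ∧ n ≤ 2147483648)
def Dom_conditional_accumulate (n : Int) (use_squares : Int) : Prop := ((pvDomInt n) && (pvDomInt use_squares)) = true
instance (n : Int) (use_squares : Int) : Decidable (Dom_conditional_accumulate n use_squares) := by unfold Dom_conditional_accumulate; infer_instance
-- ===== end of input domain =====

-- B replaces A's O(n) accumulation loop with the closed-form Gauss / square-pyramidal formulas (faster, asymptotic).


-- ===== PORT A =====
-- the while loop: state (total, i), runs while i ≤ n
def condLoop (n : Int) (use_squares : Int) (total : Int) (i : Int) : Int :=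
  if i ≤ n then
    condLoop n use_squares (if use_squares > 0 then total + i * i else total + i) (i + 1)
  else total
termination_by (n + 1 - i).toNat
decreasing_by omega

def conditional_accumulate (n : Int) (use_squares : Int) : Int :=
  condLoop n use_squares 0 1

-- ===== PORT B =====
def conditional_accumulate_alt (n : Int) (use_squares : Int) : Int :=
  if n < 1 then 0
  else if use_squares > 0 then PySem.Int.floordiv (n * (n + 1) * (2 * n + 1)) 6
  else PySem.Int.floordiv (n * (n + 1)) 2

-- ===== PRECONDITION & SPEC =====
def Spec_conditional_accumulate (n : Int) (use_squares : Int) (out : Int) : Prop := out = conditional_accumulate_alt n use_squares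
instance (n : Int) (use_squares : Int) (out : Int) : Decidable (Spec_conditional_accumulate n use_squares out) := by unfold Spec_conditional_accumulate; infer_instance

-- ===== CLAIM (what is proved, stated in full; the proofs are below) =====
def Claim_equal_conditional_accumulate : Prop := ∀ (n : Int) (use_squares : Int), Dom_conditional_accumulate n use_squares → Spec_conditional_accumulate n use_squares (conditional_accumulate n use_squares)

-- ===== LEMMAS AND PROOFS =====

-- loop invariant: for 1 ≤ i ≤ n+1, six times the loop's result equals six times
-- the accumulator plus the (scaled) closed-form difference of prefix sums
theorem condLoop_closed (n use_squares : Int) :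
    ∀ (k : Nat) (total i : Int), 1 ≤ i → i ≤ n + 1 → (n + 1 - i).toNat = k →
      6 * condLoop n use_squares total i =
        6 * total + (if use_squares > 0
          then n * (n + 1) * (2 * n + 1) - (i - 1) * i * (2 * i - 1)
          else 3 * (n * (n + 1) - (i - 1) * i)) := by
  intro k
  induction k with
  | zero =>
    intro total i h1 h2 hk
    have hi : i = n + 1 := by omega
    rw [condLoop]
    subst hi
    simp only [if_neg (by omega : ¬ (n + 1 ≤ n))]
    split <;> ring
  | succ m ih =>
    intro total i h1 h2 hk
    have hle : i ≤ n := by omega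
    rw [condLoop, if_pos hle]
    rw [ih _ (i + 1) (by omega) (by omega) (by omega)]
    split <;> ring

theorem loop_empty (n use_squares : Int) (h : n < 1) : condLoop n use_squares 0 1 = 0 := by
  rw [condLoop]; simp [show ¬ (1 ≤ n) by omega]

-- ===== VERDICT (by name: the statement is the Claim_ definition above) =====
theorem conditional_accumulate_spec : Claim_equal_conditional_accumulate := by
  intro n u _
  unfold Spec_conditional_accumulate conditional_accumulate conditional_accumulate_alt
  by_cases hn : n < 1
  · rw [loop_empty n u hn, if_pos hn]
  · rw [if_neg hn]
    have h := condLoop_closed n u (n + 1 - 1).toNat 0 1 (by omega) (by omega) rfl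
    by_cases hu : u > 0
    · rw [if_pos hu]
      simp only [if_pos hu] at h
      have h6 : n * (n + 1) * (2 * n + 1) = 6 * condLoop n u 0 1 := by linarith [h]
      rw [h6, PySem.Int.floordiv_eq_ediv_of_pos (by omega)]
      omega
    · rw [if_neg hu]
      simp only [if_neg hu] at h
      have h2 : n * (n + 1) = 2 * condLoop n u 0 1 := by linarith [h]
      rw [h2, PySem.Int.floordiv_eq_ediv_of_pos (by omega)]
      omega
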